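-- pv_equiv track=rewrite | github.com/clarkcousins/3770_project | calculate_stats.py | trim_list
-- ===== SOURCE A (Python) =====
-- def trim_list(specific_data, ball_in_play) -> list:
--     new_bip_list = []
--     player_ids_in_bip = []
--     for entry in ball_in_play:
--         player_ids_in_bip.append(entry[0])
--     inds = []
--     for entry in specific_data:
--         player_id = entry[0]
--         # computationally inefficient but whateva
--         for i in range(len(player_ids_in_bip)):
--             if player_ids_in_bip[i] == player_id:
--                 inds.append(i)
--     for i in inds:
--         new_bip_list.append(ball_in_play[i])
--     return new_bip_list
-- ===== SOURCE B (Python) =====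
-- def trim_list(specific_data, ball_in_play) -> list:
--     by_id = {}
--     for entry in ball_in_play:
--         by_id.setdefault(entry[0], []).append(entry)
--     out = []
--     for entry in specific_data:
--         out.extend(by_id.get(entry[0], []))
--     return out
-- ===== Notes on version B (the rewrite author's own statement) =====
-- stated objective: alternative
-- what changed: Replaces A's per-entry linear scan over the list of ball_in_play player ids (plus a separate index-materialisation pass) with a dict grouping ball_in_play entries by player id built in one pass, then a single lookup pass over specific_data.
import Mathlib
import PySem

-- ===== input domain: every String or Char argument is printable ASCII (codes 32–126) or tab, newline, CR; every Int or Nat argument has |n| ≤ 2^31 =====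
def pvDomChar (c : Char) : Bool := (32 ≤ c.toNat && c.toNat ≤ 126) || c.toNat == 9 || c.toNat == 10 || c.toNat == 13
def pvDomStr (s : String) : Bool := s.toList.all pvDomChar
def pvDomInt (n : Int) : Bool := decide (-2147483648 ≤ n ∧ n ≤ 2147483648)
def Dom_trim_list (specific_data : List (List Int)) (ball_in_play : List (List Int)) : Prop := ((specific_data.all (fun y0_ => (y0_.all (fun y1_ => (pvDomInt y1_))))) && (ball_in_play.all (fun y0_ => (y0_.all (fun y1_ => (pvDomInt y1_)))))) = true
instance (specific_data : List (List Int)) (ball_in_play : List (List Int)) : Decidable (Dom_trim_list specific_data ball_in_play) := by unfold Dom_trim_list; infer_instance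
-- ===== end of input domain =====

-- B replaces A's nested scan (for every specific_data entry, scan all ids of ball_in_play,
-- collect matching indices, then index back) by a dict grouping ball_in_play entries by
-- their player id, then one lookup pass (objective: alternative).

-- ===== PORT A =====
-- entry[0] is PySem.List.pyGetD … 0 0; Pre_ excludes empty inner lists, where Python raises IndexError.
def trim_list (specific_data : List (List Int)) (ball_in_play : List (List Int)) : List (List Int) :=
  let player_ids_in_bip : List Int :=
    ball_in_play.foldl (fun acc entry => acc ++ [PySem.List.pyGetD entry 0 0]) []
  let inds : List Int :=
    specific_data.foldl (fun inds entry =>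
      let player_id := PySem.List.pyGetD entry 0 0
      (PySem.List.pyRange 0 (PySem.List.len player_ids_in_bip) 1).foldl
        (fun inds i =>
          if PySem.List.pyGetD player_ids_in_bip i 0 = player_id then inds ++ [i] else inds)
        inds) []
  inds.foldl (fun acc i => acc ++ [PySem.List.pyGetD ball_in_play i []]) []

-- ===== PORT B =====
-- by_id.setdefault(entry[0], []).append(entry) is Dict.modify (key) [] (· ++ [entry]).
def trim_list_alt (specific_data : List (List Int)) (ball_in_play : List (List Int)) : List (List Int) :=
  let by_id : PySem.Dict Int (List (List Int)) :=
    ball_in_play.foldl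
      (fun d entry => d.modify (PySem.List.pyGetD entry 0 0) [] (· ++ [entry]))
      PySem.Dict.empty
  specific_data.foldl
    (fun out entry => out ++ by_id.getD (PySem.List.pyGetD entry 0 0) []) []

-- ===== PRECONDITION & SPEC =====
-- Pre_ excludes exactly the inputs where Python A raises IndexError: an empty inner list
-- (entry[0] fails) in either argument.
def Pre_trim_list (specific_data : List (List Int)) (ball_in_play : List (List Int)) : Prop :=
  (∀ e ∈ specific_data, e ≠ []) ∧ (∀ e ∈ ball_in_play, e ≠ [])
instance (specific_data : List (List Int)) (ball_in_play : List (List Int)) : Decidable (Pre_trim_list specific_data ball_in_play) := by unfold Pre_trim_list; infer_instance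

def pvWitness_trim_list : List (List Int) × List (List Int) :=
  ([[1], [3, 9]], [[1, 10], [2, 20], [1, 11]])

def Spec_trim_list (specific_data : List (List Int)) (ball_in_play : List (List Int)) (out : List (List Int)) : Prop := out = trim_list_alt specific_data ball_in_play
instance (specific_data : List (List Int)) (ball_in_play : List (List Int)) (out : List (List Int)) : Decidable (Spec_trim_list specific_data ball_in_play out) := by unfold Spec_trim_list; infer_instance

-- ===== CLAIM (what is proved, stated in full; the proofs are below) =====
def Claim_equal_trim_list : Prop := ∀ (specific_data : List (List Int)) (ball_in_play : List (List Int)), Dom_trim_list specific_data ball_in_play → Pre_trim_list specific_data ball_in_play → Spec_trim_list specific_data ball_in_play (trim_list specific_data ball_in_play)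

-- ===== LEMMAS AND PROOFS =====

-- the player id A and B both read from an entry
def pvHead (e : List Int) : Int := PySem.List.pyGetD e 0 0

-- A's matching indices for one player id, over the id list built from bip
def pvIdx (bip : List (List Int)) (pid : Int) : List Int :=
  (PySem.List.pyRange 0 (bip.length : Int) 1).filter
    (fun i => PySem.List.pyGetD (bip.map pvHead) i 0 = pid)

-- A's inner index scan, mapped back through bip, is exactly a filter of bip.
theorem pvIdx_map_get (bip : List (List Int)) (pid : Int) :
    (pvIdx bip pid).map (fun i => PySem.List.pyGetD bip i []) =
      bip.filter (fun e => pvHead e == pid) := by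
  induction bip using List.reverseRecOn with
  | nil => simp [pvIdx]
  | append_singleton bip e ih =>
    have hn : (0 : Int) ≤ (bip.length : Int) := Int.natCast_nonneg _
    unfold pvIdx
    rw [List.length_append, List.length_singleton]
    push_cast
    simp only [List.map_append, List.map_cons, List.map_nil]
    rw [PySem.List.pyRange_one_succ_right hn, List.filter_append, List.map_append,
        List.filter_append]
    have hfc : (PySem.List.pyRange 0 (bip.length : Int) 1).filter
          (fun i => decide (PySem.List.pyGetD (bip.map pvHead ++ [pvHead e]) i 0 = pid)) =
        pvIdx bip pid := by
      apply List.filter_congr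
      intro i hi
      rw [PySem.List.mem_pyRange_one] at hi
      have hlt : i.toNat < (bip.map pvHead).length := by
        simp only [List.length_map]; omega
      have hv : PySem.List.pyGetD (bip.map pvHead ++ [pvHead e]) i 0 =
          PySem.List.pyGetD (bip.map pvHead) i 0 := by
        rw [PySem.List.pyGetD_eq_getElem _ _ hi.1 (by simp; omega),
            PySem.List.pyGetD_eq_getElem _ _ hi.1 (by simp; omega)]
        exact List.getElem_append_left ..
      simp [hv]
    rw [hfc]
    have hmc : (pvIdx bip pid).map (fun i => PySem.List.pyGetD (bip ++ [e]) i []) =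
        (pvIdx bip pid).map (fun i => PySem.List.pyGetD bip i []) := by
      apply List.map_congr_left
      intro i hi
      have him := (List.mem_filter.mp hi).1
      rw [PySem.List.mem_pyRange_one] at him
      rw [PySem.List.pyGetD_eq_getElem _ _ him.1 (by simp; omega),
          PySem.List.pyGetD_eq_getElem _ _ him.1 (by omega)]
      exact List.getElem_append_left ..
    rw [hmc, ih]
    have hgl : PySem.List.pyGetD (bip ++ [e]) (bip.length : Int) [] = e := by
      rw [PySem.List.pyGetD_eq_getElem _ _ hn (by simp)]
      simp only [Int.toNat_natCast]
      exact List.getElem_concat_length rfl (by simp)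
    by_cases hc : pvHead e = pid
    · simp [hgl, hc]
    · simp [hc]

-- B's dict lookup is the same filter of bip.
theorem pvDict_getD (bip : List (List Int)) (pid : Int) :
    (bip.foldl (fun d entry => d.modify (pvHead entry) [] (· ++ [entry]))
        (PySem.Dict.empty : PySem.Dict Int (List (List Int)))).getD pid [] =
      bip.filter (fun e => pvHead e == pid) := by
  have h : bip.foldl (fun d entry => d.modify (pvHead entry) [] (· ++ [entry]))
        (PySem.Dict.empty : PySem.Dict Int (List (List Int))) =
      (bip.map (fun e => (pvHead e, e))).foldl
        (fun d p => d.modify p.1 [] (· ++ [p.2])) PySem.Dict.empty := by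
    rw [List.foldl_map]
  rw [h, PySem.Dict.getD_foldl_modify_append]
  rw [PySem.Dict.getD_empty, List.nil_append, List.filter_map]
  simp [Function.comp_def]

-- A unfolded: a flatMap of per-entry filters.
theorem trim_list_eq (sd bip : List (List Int)) :
    trim_list sd bip = sd.flatMap (fun e => bip.filter (fun b => pvHead b == pvHead e)) := by
  unfold trim_list
  have hh : ∀ e : List Int, PySem.List.pyGetD e 0 0 = pvHead e := fun _ => rfl
  simp only [hh]
  have hids : bip.foldl (fun acc entry => acc ++ [pvHead entry]) [] = bip.map pvHead := by
    rw [PySem.List.foldl_append_singleton_eq_map, List.nil_append]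
  simp only [hids, PySem.List.len_eq, List.length_map]
  rw [PySem.List.foldl_append_singleton_eq_map, List.nil_append]
  have hinner : ∀ (inds : List Int) (e : List Int),
      (PySem.List.pyRange 0 (bip.length : Int) 1).foldl
        (fun inds i =>
          if PySem.List.pyGetD (bip.map pvHead) i 0 = pvHead e then inds ++ [i] else inds)
        inds =
        inds ++ pvIdx bip (pvHead e) := by
    intro inds e
    have hif := PySem.List.foldl_append_if
      (fun i => decide (PySem.List.pyGetD (bip.map pvHead) i 0 = pvHead e))
      (fun i => i) (PySem.List.pyRange 0 (bip.length : Int) 1) inds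
    simp only [decide_eq_true_eq] at hif
    rw [hif, List.map_id']
    rfl
  simp only [hinner]
  rw [PySem.List.foldl_append_eq_flatMap, List.nil_append, List.map_flatMap]
  apply List.flatMap_congr
  intro e _
  exact pvIdx_map_get bip (pvHead e)

-- B unfolded: the same flatMap.
theorem trim_list_alt_eq (sd bip : List (List Int)) :
    trim_list_alt sd bip = sd.flatMap (fun e => bip.filter (fun b => pvHead b == pvHead e)) := by
  unfold trim_list_alt
  have hh : ∀ e : List Int, PySem.List.pyGetD e 0 0 = pvHead e := fun _ => rfl
  simp only [hh]
  rw [PySem.List.foldl_append_eq_flatMap, List.nil_append]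
  apply List.flatMap_congr
  intro e _
  exact pvDict_getD bip (pvHead e)

-- ===== VERDICT (by name: the statement is the Claim_ definition above) =====
theorem trim_list_spec : Claim_equal_trim_list := by
  intro sd bip _ _
  unfold Spec_trim_list
  rw [trim_list_eq, trim_list_alt_eq]
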